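-- pv_equiv track=rewrite | github.com/PranjalDby/DSA-Python | DynamicProgramming/minimum_swap_make_subsequence_incr.py | solve_min_swap
-- ===== SOURCE A (Python) =====
-- INT_MAX = 10 ** 9
--
-- def solve_min_swap(nums1,nums2,index,swapped):
--
--     if index == len(nums1):
--         return 0
--
--     ans = INT_MAX
--     prev1 = nums1[index-1]
--     prev2 = nums2[index-1]
--
--     # catch
--     if swapped == 1:
--         temp = prev1
--         prev1 = prev2
--         prev2 = temp
--
--     # no swap
--     if nums1[index] > prev1 and nums2[index] > prev2:
--
--         ans = solve_min_swap(nums1,nums2,index + 1,0)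
--
--     # swap :  more generally this is to handle the repition of number
--     if nums1[index] > prev2 and nums2[index] > prev1:
--         # 1 + to include the swapped way
--         ans = min(ans,1 + solve_min_swap(nums1,nums2,index + 1,1))
--
--
--     return ans
-- ===== SOURCE B (Python) =====
-- INT_MAX = 10 ** 9
--
-- def solve_min_swap(nums1, nums2, index, swapped):
--     # Bottom-up DP: one backward pass keeping the (no-swap, swap) cost pair.
--     dp0, dp1 = 0, 0  # cost from position i+1 onward, for state swapped=0 / swapped=1
--     i = len(nums1) - 1
--     while i >= index:
--         p1, p2 = nums1[i - 1], nums2[i - 1]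
--         c1, c2 = nums1[i], nums2[i]
--         new0 = INT_MAX
--         if c1 > p1 and c2 > p2:
--             new0 = dp0
--         if c1 > p2 and c2 > p1:
--             new0 = min(new0, 1 + dp1)
--         new1 = INT_MAX
--         if c1 > p2 and c2 > p1:
--             new1 = dp0
--         if c1 > p1 and c2 > p2:
--             new1 = min(new1, 1 + dp1)
--         dp0, dp1 = new0, new1
--         i -= 1
--     return dp1 if swapped == 1 else dp0
-- ===== Notes on version B (the rewrite author's own statement) =====
-- stated objective: alternative
-- what changed: Replaces A's top-down branching recursion with a single backward loop that carries the two-value DP pair (cost with previous pair unswapped, cost with it swapped) per position; it avoids A's worst-case repeated re-exploration of suffixes at the cost of always scanning the whole suffix once.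
-- outside the precondition, e.g. on solve_min_swap([4, 9, 9, 35, -1], [9, -412, 6], 1, 2): A returns 1000000000, B raises IndexError
import Mathlib
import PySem

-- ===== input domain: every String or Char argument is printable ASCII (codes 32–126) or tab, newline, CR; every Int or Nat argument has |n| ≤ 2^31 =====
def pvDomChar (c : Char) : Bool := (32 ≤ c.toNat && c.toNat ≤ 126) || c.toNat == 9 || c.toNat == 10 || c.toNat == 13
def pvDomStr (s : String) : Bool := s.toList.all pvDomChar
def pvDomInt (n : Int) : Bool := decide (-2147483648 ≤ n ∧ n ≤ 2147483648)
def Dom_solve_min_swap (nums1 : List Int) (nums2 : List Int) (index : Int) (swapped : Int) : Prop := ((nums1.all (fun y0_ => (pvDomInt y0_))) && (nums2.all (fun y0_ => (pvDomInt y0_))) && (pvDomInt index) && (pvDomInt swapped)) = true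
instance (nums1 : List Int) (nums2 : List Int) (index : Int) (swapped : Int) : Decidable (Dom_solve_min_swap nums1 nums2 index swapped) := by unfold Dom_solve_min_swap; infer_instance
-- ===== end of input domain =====

-- ===== PORT A =====
-- B replaces A's top-down branching recursion by one backward DP pass over
-- the (no-swap, swap) cost pair; return values proved equal on Pre_.

-- fuel-indexed transliteration of A's recursion (fuel covers the n-index+1 calls Pre_ admits)
def solveA (nums1 : List Int) (nums2 : List Int) : Nat → Int → Int → Int
  | 0, _, _ => 0
  | (f+1), index, swapped =>
    if index = (nums1.length : Int) then 0
    else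
      let p1 := (PySem.List.pyGet? nums1 (index - 1)).getD 0
      let p2 := (PySem.List.pyGet? nums2 (index - 1)).getD 0
      let prev1 := if swapped = 1 then p2 else p1
      let prev2 := if swapped = 1 then p1 else p2
      let c1 := (PySem.List.pyGet? nums1 index).getD 0
      let c2 := (PySem.List.pyGet? nums2 index).getD 0
      let ans : Int := 10 ^ 9
      let ans := if c1 > prev1 ∧ c2 > prev2 then solveA nums1 nums2 f (index + 1) 0 else ans
      let ans := if c1 > prev2 ∧ c2 > prev1 then min ans (1 + solveA nums1 nums2 f (index + 1) 1) else ans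
      ans

def solve_min_swap (nums1 : List Int) (nums2 : List Int) (index : Int) (swapped : Int) : Int :=
  solveA nums1 nums2 ((nums1.length : Int) - index + 1).toNat index swapped

-- ===== PORT B =====
-- the loop body of Source B: dp is the (swapped=0, swapped=1) cost pair for position i+1
def altStep (nums1 : List Int) (nums2 : List Int) (dp : Int × Int) (i : Int) : Int × Int :=
  let p1 := (PySem.List.pyGet? nums1 (i - 1)).getD 0
  let p2 := (PySem.List.pyGet? nums2 (i - 1)).getD 0
  let c1 := (PySem.List.pyGet? nums1 i).getD 0
  let c2 := (PySem.List.pyGet? nums2 i).getD 0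
  let new0 : Int := 10 ^ 9
  let new0 := if c1 > p1 ∧ c2 > p2 then dp.1 else new0
  let new0 := if c1 > p2 ∧ c2 > p1 then min new0 (1 + dp.2) else new0
  let new1 : Int := 10 ^ 9
  let new1 := if c1 > p2 ∧ c2 > p1 then dp.1 else new1
  let new1 := if c1 > p1 ∧ c2 > p2 then min new1 (1 + dp.2) else new1
  (new0, new1)

-- Source B's while loop, i counting down from len(nums1)-1 to index
def altGo (nums1 : List Int) (nums2 : List Int) (index : Int) (i : Int) (dp : Int × Int) : Int × Int :=
  if i < index then dp
  else altGo nums1 nums2 index (i - 1) (altStep nums1 nums2 dp i)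
termination_by (i - index + 1).toNat
decreasing_by omega

def solve_min_swap_alt (nums1 : List Int) (nums2 : List Int) (index : Int) (swapped : Int) : Int :=
  let dp := altGo nums1 nums2 index ((nums1.length : Int) - 1) (0, 0)
  if swapped = 1 then dp.2 else dp.1

-- ===== PRECONDITION & SPEC =====
-- Pre_ excludes the inputs where the Python A raises or may raise: index > len(nums1) or
-- index <= -len(nums1) (unbounded recursion / IndexError), and length-mismatched inputs
-- with nums2 shorter than nums1, on which A raises IndexError unless a failed comparison
-- happens to stop the recursion before it reaches nums2's end (then A returns INT_MAX);
-- B's single pass always scans to the end and raises IndexError there.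
def Pre_solve_min_swap (nums1 : List Int) (nums2 : List Int) (index : Int) (swapped : Int) : Prop :=
  index = (nums1.length : Int) ∨
    (-(nums1.length : Int) < index ∧ index < (nums1.length : Int) ∧ nums1.length ≤ nums2.length)
instance (nums1 : List Int) (nums2 : List Int) (index : Int) (swapped : Int) : Decidable (Pre_solve_min_swap nums1 nums2 index swapped) := by unfold Pre_solve_min_swap; infer_instance

def pvWitness_solve_min_swap : List Int × List Int × Int × Int := ([1, 3, 2], [2, 1, 4], 1, 0)

def Spec_solve_min_swap (nums1 : List Int) (nums2 : List Int) (index : Int) (swapped : Int) (out : Int) : Prop := out = solve_min_swap_alt nums1 nums2 index swapped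
instance (nums1 : List Int) (nums2 : List Int) (index : Int) (swapped : Int) (out : Int) : Decidable (Spec_solve_min_swap nums1 nums2 index swapped out) := by unfold Spec_solve_min_swap; infer_instance

-- ===== CLAIM (what is proved, stated in full; the proofs are below) =====
def Claim_equal_solve_min_swap : Prop := ∀ (nums1 : List Int) (nums2 : List Int) (index : Int) (swapped : Int), Dom_solve_min_swap nums1 nums2 index swapped → Pre_solve_min_swap nums1 nums2 index swapped → Spec_solve_min_swap nums1 nums2 index swapped (solve_min_swap nums1 nums2 index swapped)

-- ===== LEMMAS AND PROOFS =====

-- A's recursion only tests swapped = 1; any other value behaves like 0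
lemma solveA_swapped_ne_one (nums1 nums2 : List Int) (f : Nat) (index swapped : Int)
    (h : swapped ≠ 1) : solveA nums1 nums2 f index swapped = solveA nums1 nums2 f index 0 := by
  cases f with
  | zero => rfl
  | succ f => simp [solveA, h]

-- the loop invariant: altGo carries the pair (solveA (j+1) 0, solveA (j+1) 1) down to index
lemma altGo_invariant (nums1 nums2 : List Int) (index : Int) :
    ∀ (k : Nat) (j : Int), j = index - 1 + (k : Int) → j < (nums1.length : Int) →
      altGo nums1 nums2 index j
        (solveA nums1 nums2 ((nums1.length : Int) - (j + 1) + 1).toNat (j + 1) 0,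
         solveA nums1 nums2 ((nums1.length : Int) - (j + 1) + 1).toNat (j + 1) 1) =
      (solveA nums1 nums2 ((nums1.length : Int) - index + 1).toNat index 0,
       solveA nums1 nums2 ((nums1.length : Int) - index + 1).toNat index 1) := by
  intro k
  induction k with
  | zero =>
    intro j hj hlt
    have hji : j < index := by omega
    have : j + 1 = index := by omega
    rw [altGo, if_pos hji, this]
  | succ k ih =>
    intro j hj hlt
    have hji : ¬ j < index := by omega
    rw [altGo, if_neg hji]
    have hstep : altStep nums1 nums2
        (solveA nums1 nums2 ((nums1.length : Int) - (j + 1) + 1).toNat (j + 1) 0,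
         solveA nums1 nums2 ((nums1.length : Int) - (j + 1) + 1).toNat (j + 1) 1) j =
        (solveA nums1 nums2 ((nums1.length : Int) - j + 1).toNat j 0,
         solveA nums1 nums2 ((nums1.length : Int) - j + 1).toNat j 1) := by
      have hfuel : ((nums1.length : Int) - j + 1).toNat
          = ((nums1.length : Int) - (j + 1) + 1).toNat + 1 := by omega
      have hjne : j ≠ (nums1.length : Int) := by omega
      rw [hfuel]
      simp only [altStep, solveA, if_neg hjne]
      simp only [show ((0 : Int) = 1) = False by simp,
        if_true, if_false, and_comm]
    rw [hstep]
    have := ih (j - 1) (by omega) (by omega)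
    simpa using this

-- ===== VERDICT (by name: the statement is the Claim_ definition above) =====
theorem solve_min_swap_spec : Claim_equal_solve_min_swap := by
  intro nums1 nums2 index swapped _ hpre
  unfold Spec_solve_min_swap solve_min_swap solve_min_swap_alt
  rcases hpre with h | h
  · -- index = len: A returns 0 immediately, B's loop does not run
    have hfuel : ((nums1.length : Int) - index + 1).toNat = 1 := by omega
    have hlt : (nums1.length : Int) - 1 < index := by omega
    rw [altGo, if_pos hlt, hfuel]
    simp [solveA, h]
  · -- -len < index < len: the loop invariant, started at j = len - 1 with dp = (0,0)
    have hbase0 : solveA nums1 nums2 (((nums1.length : Int) - ((nums1.length : Int) - 1 + 1) + 1).toNat) ((nums1.length : Int) - 1 + 1) 0 = 0 := by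
      have : ((nums1.length : Int) - ((nums1.length : Int) - 1 + 1) + 1).toNat = 1 := by omega
      rw [this]; simp [solveA]
    have hbase1 : solveA nums1 nums2 (((nums1.length : Int) - ((nums1.length : Int) - 1 + 1) + 1).toNat) ((nums1.length : Int) - 1 + 1) 1 = 0 := by
      have : ((nums1.length : Int) - ((nums1.length : Int) - 1 + 1) + 1).toNat = 1 := by omega
      rw [this]; simp [solveA]
    have hinv := altGo_invariant nums1 nums2 index ((nums1.length : Int) - 1 - (index - 1)).toNat
      ((nums1.length : Int) - 1) (by omega) (by omega)
    rw [hbase0, hbase1] at hinv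
    rw [hinv]
    by_cases hs : swapped = 1
    · simp [hs]
    · rw [if_neg hs, solveA_swapped_ne_one nums1 nums2 _ index swapped hs]
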